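-- pv_equiv track=rewrite | github.com/vinchinzu/euler | python/960.py | is_stuck
-- ===== SOURCE A (Python) =====
-- from typing import List, Tuple, Set
--
-- def is_complete(state: List[int]) -> bool:
--     """Check if all piles are empty."""
--     return all(pile == 0 for pile in state)
--
-- def is_stuck(state: List[int], n: int) -> bool:
--     """
--     Check if the game is stuck (no valid moves possible).
--     A state is stuck if it's not complete and no valid moves exist.
--     """
--     if is_complete(state):
--         return False
--
--     # Check if any valid move exists
--     for i in range(len(state)):
--         for j in range(i + 1, len(state)):
--             # Try all ways to split n stones between piles i and j
--             for a in range(min(state[i], n) + 1):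
--                 b = n - a
--                 if b >= 0 and b <= state[j]:
--                     return False  # Found a valid move
--     return True
-- ===== SOURCE B (Python) =====
-- def is_stuck(state, n):
--     """
--     Check if the game is stuck (no valid moves possible).
--     A move exists iff n >= 0 and some pair of piles (both nonnegative)
--     holds at least n stones together; it suffices to test the two
--     largest nonnegative piles.
--     """
--     if all(pile == 0 for pile in state):
--         return False
--     if n < 0:
--         return True
--     tops = sorted((pile for pile in state if pile >= 0), reverse=True)
--     return len(tops) < 2 or tops[0] + tops[1] < n
-- ===== Notes on version B (the rewrite author's own statement) =====
-- stated objective: faster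
-- what changed: A tries every split a of n for every ordered pile pair (triple nested loop); B notes a move exists iff n >= 0 and some two piles (both nonnegative) hold at least n together, so it just sorts the nonnegative piles and tests the sum of the two largest.
import Mathlib
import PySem

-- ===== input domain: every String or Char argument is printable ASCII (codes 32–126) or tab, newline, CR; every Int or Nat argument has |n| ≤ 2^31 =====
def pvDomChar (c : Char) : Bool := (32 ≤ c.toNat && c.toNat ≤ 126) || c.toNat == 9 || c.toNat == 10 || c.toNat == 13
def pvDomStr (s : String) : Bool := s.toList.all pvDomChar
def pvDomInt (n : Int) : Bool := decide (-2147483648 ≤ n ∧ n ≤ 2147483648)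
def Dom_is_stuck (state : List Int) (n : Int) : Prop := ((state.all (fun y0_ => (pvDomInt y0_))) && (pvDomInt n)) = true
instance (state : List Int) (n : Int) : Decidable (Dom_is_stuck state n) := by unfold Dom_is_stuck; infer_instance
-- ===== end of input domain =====

-- B replaces A's scan over all splits of every pile pair by one check of the
-- two largest nonnegative piles (a move exists iff n ≥ 0 and they hold ≥ n together).

-- ===== PORT A =====
def is_complete (state : List Int) : Bool := state.all (fun pile => pile == 0)

def is_stuck (state : List Int) (n : Int) : Bool :=
  if is_complete state then false
  else
    -- `for i / for j / for a` with early `return False` = negated existence scan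
    !((PySem.List.pyRange 0 (state.length : Int) 1).any (fun i =>
       (PySem.List.pyRange (i + 1) (state.length : Int) 1).any (fun j =>
         (PySem.List.pyRange 0 (min (PySem.List.pyGetD state i 0) n + 1) 1).any (fun a =>
           decide (n - a ≥ 0) && decide (n - a ≤ PySem.List.pyGetD state j 0)))))

-- ===== PORT B =====
def is_stuck_alt (state : List Int) (n : Int) : Bool :=
  if state.all (fun pile => pile == 0) then false
  else if n < 0 then true
  else
    match PySem.List.sorted (state.filter (fun pile => decide (pile ≥ 0))) (fun x => x) true with
    | t0 :: t1 :: _ => decide (t0 + t1 < n)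
    | _ => true

-- ===== PRECONDITION & SPEC =====
def Spec_is_stuck (state : List Int) (n : Int) (out : Bool) : Prop := out = is_stuck_alt state n
instance (state : List Int) (n : Int) (out : Bool) : Decidable (Spec_is_stuck state n out) := by unfold Spec_is_stuck; infer_instance

-- ===== CLAIM (what is proved, stated in full; the proofs are below) =====
def Claim_equal_is_stuck : Prop := ∀ (state : List Int) (n : Int), Dom_is_stuck state n → Spec_is_stuck state n (is_stuck state n)

-- ===== LEMMAS AND PROOFS =====

-- "some pair of distinct piles, both nonnegative, together holding at least n stones"
def PairEx (n : Int) : List Int → Prop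
  | [] => False
  | x :: t => (∃ y ∈ t, 0 ≤ x ∧ 0 ≤ y ∧ n ≤ x + y) ∨ PairEx n t

lemma pairEx_nil (n : Int) : ¬ PairEx n [] := fun h => h

lemma pairEx_cons (n x : Int) (t : List Int) :
    PairEx n (x :: t) ↔ (∃ y ∈ t, 0 ≤ x ∧ 0 ≤ y ∧ n ≤ x + y) ∨ PairEx n t := Iff.rfl

-- the innermost `for a` loop of A finds a split iff both piles are nonnegative,
-- n is nonnegative and the two piles together hold at least n
lemma innerAny (si sj n : Int) :
    ((PySem.List.pyRange 0 (min si n + 1) 1).any (fun a =>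
      decide (n - a ≥ 0) && decide (n - a ≤ sj))) = true ↔
    (0 ≤ si ∧ 0 ≤ sj ∧ 0 ≤ n ∧ n ≤ si + sj) := by
  simp only [List.any_eq_true, Bool.and_eq_true, decide_eq_true_eq,
    PySem.List.mem_pyRange_one]
  constructor
  · rintro ⟨a, ⟨h1, h2⟩, h3, h4⟩; omega
  · intro h
    exact ⟨max 0 (n - sj), ⟨by omega, by omega⟩, by omega, by omega⟩

-- index form of PairEx
lemma pairEx_iff (n : Int) (l : List Int) :
    PairEx n l ↔ ∃ p q : ℕ, p < q ∧ q < l.length ∧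
      0 ≤ l.getD p 0 ∧ 0 ≤ l.getD q 0 ∧ n ≤ l.getD p 0 + l.getD q 0 := by
  induction l with
  | nil => simp [PairEx]
  | cons x t ih =>
    rw [pairEx_cons]
    constructor
    · rintro (⟨y, hy, h1, h2, h3⟩ | h)
      · obtain ⟨i, hi, hiy⟩ := List.mem_iff_getElem.mp hy
        refine ⟨0, i + 1, by omega, by simpa using hi, ?_⟩
        simp only [List.getD_cons_zero, List.getD_cons_succ,
          List.getD_eq_getElem t 0 hi, hiy]
        exact ⟨h1, h2, h3⟩
      · obtain ⟨p, q, hpq, hq, hp1, hq1, hs⟩ := ih.mp h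
        exact ⟨p + 1, q + 1, by omega, by simpa using hq, by simpa using hp1,
          by simpa using hq1, by simpa using hs⟩
    · rintro ⟨p, q, hpq, hq, hp1, hq1, hs⟩
      match p, q with
      | 0, q + 1 =>
        left
        have hq' : q < t.length := by simpa using hq
        refine ⟨t.getD q 0, ?_, ?_⟩
        · rw [List.getD_eq_getElem t 0 hq']; exact List.getElem_mem _
        · simp only [List.getD_cons_zero, List.getD_cons_succ] at hp1 hq1 hs
          exact ⟨hp1, hq1, hs⟩
      | p + 1, q + 1 =>
        right
        exact ih.mpr ⟨p, q, by omega, by simpa using hq, by simpa using hp1,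
          by simpa using hq1, by simpa using hs⟩

-- A's double index loop finds a pair iff n ≥ 0 and PairEx holds
lemma doubleAny (l : List Int) (n : Int) :
    ((PySem.List.pyRange 0 (l.length : Int) 1).any (fun i =>
       (PySem.List.pyRange (i + 1) (l.length : Int) 1).any (fun j =>
         (PySem.List.pyRange 0 (min (PySem.List.pyGetD l i 0) n + 1) 1).any (fun a =>
           decide (n - a ≥ 0) && decide (n - a ≤ PySem.List.pyGetD l j 0))))) = true ↔
    (0 ≤ n ∧ PairEx n l) := by
  simp only [List.any_eq_true, PySem.List.mem_pyRange_one]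
  constructor
  · rintro ⟨i, ⟨hi0, hil⟩, j, ⟨hji, hjl⟩, a, ha1, ha2⟩
    have h := (innerAny (PySem.List.pyGetD l i 0) (PySem.List.pyGetD l j 0) n).mp
      (by simp only [List.any_eq_true, PySem.List.mem_pyRange_one]; exact ⟨a, ha1, ha2⟩)
    rw [show i = ((i.toNat : ℕ) : Int) by omega, show j = ((j.toNat : ℕ) : Int) by omega,
        PySem.List.pyGetD_natCast, PySem.List.pyGetD_natCast] at h
    refine ⟨h.2.2.1, (pairEx_iff n l).mpr ⟨i.toNat, j.toNat, by omega, by omega,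
      h.1, h.2.1, h.2.2.2⟩⟩
  · rintro ⟨hn, hex⟩
    obtain ⟨p, q, hpq, hq, hp1, hq1, hs⟩ := (pairEx_iff n l).mp hex
    refine ⟨(p : Int), ⟨by omega, by exact_mod_cast by omega⟩,
            (q : Int), ⟨by exact_mod_cast by omega, by exact_mod_cast hq⟩, ?_⟩
    have := (innerAny (PySem.List.pyGetD l (p : Int) 0) (PySem.List.pyGetD l (q : Int) 0) n).mpr
      (by rw [PySem.List.pyGetD_natCast, PySem.List.pyGetD_natCast]; exact ⟨hp1, hq1, hn, hs⟩)
    simpa only [List.any_eq_true, PySem.List.mem_pyRange_one] using this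

-- negative piles never participate in a pair: filtering them out is harmless
lemma pairEx_filter (n : Int) (l : List Int) :
    PairEx n (l.filter (fun pile => decide (pile ≥ 0))) ↔ PairEx n l := by
  induction l with
  | nil => simp [PairEx]
  | cons x t ih =>
    by_cases hx : x ≥ 0
    · rw [List.filter_cons_of_pos (by simpa using hx)]
      rw [pairEx_cons, pairEx_cons, ih]
      constructor
      · rintro (⟨y, hy, h⟩ | h)
        · exact Or.inl ⟨y, (List.mem_filter.mp hy).1, h⟩
        · exact Or.inr h
      · rintro (⟨y, hy, h1, h2, h3⟩ | h)
        · exact Or.inl ⟨y, List.mem_filter.mpr ⟨hy, by simpa using h2⟩, h1, h2, h3⟩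
        · exact Or.inr h
    · rw [List.filter_cons_of_neg (by simpa using hx)]
      rw [pairEx_cons, ih]
      constructor
      · exact Or.inr
      · rintro (⟨y, _, h1, _⟩ | h)
        · exact absurd h1 (by omega)
        · exact h

-- PairEx only depends on the multiset of piles
lemma pairEx_perm (n : Int) {l l' : List Int} (h : l.Perm l') :
    PairEx n l ↔ PairEx n l' := by
  induction h with
  | nil => exact Iff.rfl
  | cons x h ih =>
    rw [pairEx_cons, pairEx_cons, ih]
    constructor
    · rintro (⟨y, hy, hq⟩ | hp)
      · exact Or.inl ⟨y, h.mem_iff.mp hy, hq⟩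
      · exact Or.inr hp
    · rintro (⟨y, hy, hq⟩ | hp)
      · exact Or.inl ⟨y, h.mem_iff.mpr hy, hq⟩
      · exact Or.inr hp
  | swap x y t =>
    rw [pairEx_cons, pairEx_cons, pairEx_cons, pairEx_cons]
    simp only [List.mem_cons]
    constructor
    · rintro (⟨z, (rfl | hz), h1, h2, h3⟩ | ⟨z, hz, h1, h2, h3⟩ | hp)
      · exact Or.inl ⟨y, Or.inl rfl, by omega, by omega, by omega⟩
      · exact Or.inr (Or.inl ⟨z, hz, h1, h2, h3⟩)
      · exact Or.inl ⟨z, Or.inr hz, h1, h2, h3⟩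
      · exact Or.inr (Or.inr hp)
    · rintro (⟨z, (rfl | hz), h1, h2, h3⟩ | ⟨z, hz, h1, h2, h3⟩ | hp)
      · exact Or.inl ⟨x, Or.inl rfl, by omega, by omega, by omega⟩
      · exact Or.inr (Or.inl ⟨z, hz, h1, h2, h3⟩)
      · exact Or.inl ⟨z, Or.inr hz, h1, h2, h3⟩
      · exact Or.inr (Or.inr hp)
  | trans h1 h2 ih1 ih2 => exact ih1.trans ih2

-- on a descending list the best pair is the first two elements
lemma pairEx_bound (n : Int) (l : List Int) (hs : l.Pairwise (fun a b => b ≤ a)) :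
    PairEx n l → ∃ t0 t1 r, l = t0 :: t1 :: r ∧ n ≤ t0 + t1 := by
  induction l with
  | nil => exact fun h => absurd h (pairEx_nil n)
  | cons x t ih =>
    intro h
    rw [pairEx_cons] at h
    rcases h with ⟨y, hy, h1, h2, h3⟩ | hp
    · rcases t with _ | ⟨t1, r⟩
      · simp at hy
      · refine ⟨x, t1, r, rfl, ?_⟩
        have hle : y ≤ t1 := by
          rcases List.mem_cons.mp hy with rfl | hy'
          · exact le_refl _
          · exact (List.pairwise_cons.mp (List.pairwise_cons.mp hs).2).1 y hy'
        omega
    · obtain ⟨t1, t2, r, he, hb⟩ := ih (List.pairwise_cons.mp hs).2 hp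
      subst he
      have hx1 : t1 ≤ x := (List.pairwise_cons.mp hs).1 t1 (by simp)
      have ht12 : t2 ≤ t1 := (List.pairwise_cons.mp (List.pairwise_cons.mp hs).2).1 t2 (by simp)
      exact ⟨x, t1, t2 :: r, rfl, by omega⟩

lemma pairEx_head2 (n t0 t1 : Int) (r : List Int)
    (hs : (t0 :: t1 :: r).Pairwise (fun a b => b ≤ a))
    (h0 : 0 ≤ t0) (h1 : 0 ≤ t1) :
    PairEx n (t0 :: t1 :: r) ↔ n ≤ t0 + t1 := by
  constructor
  · intro h
    obtain ⟨a, b, s, he, hb⟩ := pairEx_bound n _ hs h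
    injection he with e1 he; injection he with e2 _
    omega
  · intro h
    rw [pairEx_cons]
    exact Or.inl ⟨t1, by simp, h0, h1, h⟩

-- ===== VERDICT (by name: the statement is the Claim_ definition above) =====
theorem is_stuck_spec : Claim_equal_is_stuck := by
  intro state n _
  unfold Spec_is_stuck is_stuck is_stuck_alt is_complete
  by_cases hc : state.all (fun pile => pile == 0) = true
  · simp [hc]
  · rw [if_neg hc, if_neg hc]
    by_cases hn : n < 0
    · rw [if_pos hn]
      have hfalse : ¬ _ := fun h => absurd ((doubleAny state n).mp h).1 (by omega)
      simp at hfalse ⊢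
      exact hfalse
    · rw [if_neg hn]
      have hperm := PySem.List.sorted_perm (state.filter (fun pile => decide (pile ≥ 0))) (fun x : Int => x) true
      have hpw := PySem.List.sorted_pairwise_rev (state.filter (fun pile => decide (pile ≥ 0))) (fun x : Int => x)
      have hchain : (PairEx n (PySem.List.sorted (state.filter (fun pile => decide (pile ≥ 0))) (fun x : Int => x) true)) ↔ PairEx n state :=
        (pairEx_perm n hperm).trans (pairEx_filter n state)
      have hnn : ∀ x ∈ PySem.List.sorted (state.filter (fun pile => decide (pile ≥ 0))) (fun x : Int => x) true, 0 ≤ x := by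
        intro x hx
        have := (PySem.List.mem_sorted _ _ _ x).mp hx
        have := (List.mem_filter.mp this).2
        simpa using this
      rcases hts : PySem.List.sorted (state.filter (fun pile => decide (pile ≥ 0))) (fun x : Int => x) true with _ | ⟨t0, _ | ⟨t1, r⟩⟩
      · rw [hts] at hchain
        have : ¬ PairEx n state := fun h => (by exact pairEx_nil n (hchain.mpr h))
        have hfalse : ¬ _ := fun h => absurd ((doubleAny state n).mp h).2 this
        simp at hfalse ⊢
        exact hfalse
      · rw [hts] at hchain
        have : ¬ PairEx n state := fun h => (by simpa [pairEx_cons, pairEx_nil] using hchain.mpr h)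
        have hfalse : ¬ _ := fun h => absurd ((doubleAny state n).mp h).2 this
        simp at hfalse ⊢
        exact hfalse
      · rw [hts] at hchain hpw hnn
        have hiff : PairEx n state ↔ n ≤ t0 + t1 := by
          rw [← hchain]
          exact pairEx_head2 n t0 t1 r (by simpa using hpw)
            (hnn t0 (by simp)) (hnn t1 (by simp))
        by_cases hle : n ≤ t0 + t1
        · have : _ = true := (doubleAny state n).mpr ⟨by omega, hiff.mpr hle⟩
          rw [this]
          simp [show ¬ (t0 + t1 < n) by omega]
        · have hfalse : ¬ _ := fun h => absurd (hiff.mp ((doubleAny state n).mp h).2) hle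
          simp [show t0 + t1 < n by omega] at hfalse ⊢
          exact hfalse
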